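-- pv_equiv track=rewrite | github.com/anniecv/PunterosLetales | Alejandro/ejercicosProrg2/clase5/comprensionLista.py | es_matriz_simetrica
-- ===== SOURCE A (Python) =====
-- def es_matriz_simetrica(matriz):
--     n = len(matriz)
--
--     for fila in matriz:
--         if len(fila) != n:
--             return False
--
--     for i in range(n):
--         for j in range(i, n):
--             if matriz[i][j] != matriz[j][i]:
--                 return False
--     return True
-- ===== SOURCE B (Python) =====
-- def es_matriz_simetrica(matriz):
--     n = len(matriz)
--     if any(len(fila) != n for fila in matriz):
--         return False
--     trans = list(zip(*matriz))
--     return all(x == y for fila, col in zip(matriz, trans) for x, y in zip(fila, col))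
-- ===== Notes on version B (the rewrite author's own statement) =====
-- stated objective: alternative
-- what changed: Replaces the indexed upper-triangle double loop with building the transpose via zip(*matriz) and comparing it to the matrix element-by-element in one comprehension.
import Mathlib
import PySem

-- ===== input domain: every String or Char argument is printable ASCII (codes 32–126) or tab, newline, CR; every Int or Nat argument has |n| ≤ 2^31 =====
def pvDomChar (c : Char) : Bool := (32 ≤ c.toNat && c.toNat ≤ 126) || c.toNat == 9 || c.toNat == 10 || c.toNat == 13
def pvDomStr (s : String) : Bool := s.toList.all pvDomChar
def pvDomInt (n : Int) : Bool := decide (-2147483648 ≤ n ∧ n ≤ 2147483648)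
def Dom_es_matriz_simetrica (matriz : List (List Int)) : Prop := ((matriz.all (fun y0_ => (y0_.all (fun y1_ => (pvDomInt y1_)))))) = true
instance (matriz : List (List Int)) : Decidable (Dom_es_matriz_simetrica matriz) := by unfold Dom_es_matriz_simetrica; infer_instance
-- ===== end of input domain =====

-- B builds the transpose (zip(*matriz)) and compares it to the matrix element-by-element, instead of A's indexed upper-triangle scan; alternative structure, same cost.

-- ===== PORT A =====
def es_matriz_simetrica (matriz : List (List Int)) : Bool :=
  let n := matriz.length
  if matriz.all (fun fila => fila.length == n) then
    (PySem.List.pyRange 0 (n : Int) 1).all (fun i =>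
      (PySem.List.pyRange i (n : Int) 1).all (fun j =>
        PySem.List.pyGetD (PySem.List.pyGetD matriz i []) j 0 ==
          PySem.List.pyGetD (PySem.List.pyGetD matriz j []) i 0))
  else false

-- ===== PORT B =====
-- zip(*matriz): list of columns; B only evaluates it on square matrices, where this
-- column-by-column construction is exactly Python's zip(*matriz).
def pvZipStar (m : List (List Int)) : List (List Int) :=
  match m with
  | [] => []
  | r :: _ => (List.range r.length).map (fun j => m.map (fun row => row.getD j 0))

def es_matriz_simetrica_alt (matriz : List (List Int)) : Bool :=
  let n := matriz.length
  if matriz.any (fun fila => fila.length != n) then false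
  else
    let trans := pvZipStar matriz
    (matriz.zip trans).all (fun p => (p.1.zip p.2).all (fun q => q.1 == q.2))


-- ===== PRECONDITION & SPEC =====
def Spec_es_matriz_simetrica (matriz : List (List Int)) (out : Bool) : Prop := out = es_matriz_simetrica_alt matriz
instance (matriz : List (List Int)) (out : Bool) : Decidable (Spec_es_matriz_simetrica matriz out) := by unfold Spec_es_matriz_simetrica; infer_instance

-- ===== CLAIM (what is proved, stated in full; the proofs are below) =====
def Claim_equal_es_matriz_simetrica : Prop := ∀ (matriz : List (List Int)), Dom_es_matriz_simetrica matriz → Spec_es_matriz_simetrica matriz (es_matriz_simetrica matriz)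

-- ===== LEMMAS AND PROOFS =====

-- the common characterisation of both results: the matrix is square and every entry equals its mirror
def pvSym (m : List (List Int)) : Prop :=
  (∀ fila ∈ m, fila.length = m.length) ∧
  ∀ i j : Nat, i < m.length → j < m.length →
    (m.getD i []).getD j 0 = (m.getD j []).getD i 0

lemma pvGet2 (m : List (List Int)) (i j : Int) (hi : 0 ≤ i) (hj : 0 ≤ j) :
    PySem.List.pyGetD (PySem.List.pyGetD m i []) j 0 = (m.getD i.toNat []).getD j.toNat 0 := by
  lift i to ℕ using hi; lift j to ℕ using hj; simp

lemma esA_iff (m : List (List Int)) : es_matriz_simetrica m = true ↔ pvSym m := by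
  unfold es_matriz_simetrica pvSym
  by_cases hsq : ∀ fila ∈ m, fila.length = m.length
  · have hb : (m.all fun fila => fila.length == m.length) = true := by
      simpa [List.all_eq_true] using hsq
    simp only [hb, if_true, List.all_eq_true, PySem.List.mem_pyRange_one, beq_iff_eq]
    constructor
    · intro h
      refine ⟨hsq, fun i j hi hj => ?_⟩
      rcases Nat.le_total i j with hle | hle2
      · have := h (i:Int) ⟨by omega, by exact_mod_cast hi⟩ (j:Int) ⟨by exact_mod_cast hle, by exact_mod_cast hj⟩
        rw [pvGet2 m _ _ (by omega) (by omega)] at this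
        simpa using this
      · have := h (j:Int) ⟨by omega, by exact_mod_cast hj⟩ (i:Int) ⟨by exact_mod_cast hle2, by exact_mod_cast hi⟩
        rw [pvGet2 m j i (by omega) (by omega), pvGet2 m i j (by omega) (by omega)] at this
        simp only [Int.toNat_natCast] at this
        exact this.symm
    · intro h i hi j hj
      rw [pvGet2 m i j hi.1 (by omega), pvGet2 m j i (by omega) hi.1]
      exact h.2 i.toNat j.toNat (by omega) (by omega)
  · have hb : (m.all fun fila => fila.length == m.length) = false := by
      simp only [List.all_eq_false]
      push Not at hsq
      obtain ⟨f, hf, hne⟩ := hsq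
      exact ⟨f, hf, by simpa using hne⟩
    simp only [hb, Bool.false_eq_true, if_false, false_iff]
    intro ⟨h1, _⟩; exact hsq h1

lemma all_zip_iff {α β : Type} (l : List α) (l' : List β) (p : α × β → Bool) :
    (l.zip l').all p = true ↔
      ∀ k, (h1 : k < l.length) → (h2 : k < l'.length) → p (l[k], l'[k]) = true := by
  rw [List.all_eq_true]
  constructor
  · intro h k h1 h2
    have hk : k < (l.zip l').length := by simp [List.length_zip]; omega
    have := h _ (List.getElem_mem hk)
    simpa [List.getElem_zip] using this
  · intro h x hx
    obtain ⟨k, hk, rfl⟩ := List.mem_iff_getElem.mp hx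
    have h1 : k < l.length := by simp [List.length_zip] at hk; omega
    have h2 : k < l'.length := by simp [List.length_zip] at hk; omega
    simpa [List.getElem_zip] using h k h1 h2

lemma esB_iff (m : List (List Int)) : es_matriz_simetrica_alt m = true ↔ pvSym m := by
  unfold es_matriz_simetrica_alt pvSym
  by_cases hsq : ∀ fila ∈ m, fila.length = m.length
  · have hb : (m.any fun fila => fila.length != m.length) = false := by
      simp only [List.any_eq_false]
      intro f hf
      simpa using hsq f hf
    simp only [hb, Bool.false_eq_true, if_false]
    match m with
    | [] => simp [pvZipStar]
    | r :: rest =>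
      rw [show pvZipStar (r :: rest) = (List.range r.length).map
        (fun j => (r :: rest).map (fun row => row.getD j 0)) from rfl]
      rw [all_zip_iff]
      have hr : r.length = (r :: rest).length := hsq r (List.mem_cons_self ..)
      constructor
      · intro h
        refine ⟨hsq, fun i j hi hj => ?_⟩
        have h2 : i < ((List.range r.length).map
            (fun j => (r :: rest).map (fun row => row.getD j 0))).length := by
          simpa using hr ▸ hi
        have := h i hi h2
        rw [all_zip_iff] at this
        simp only [List.getElem_map, List.getElem_range] at this
        have hlen : j < ((r :: rest)[i]).length := by
          rw [hsq _ (List.getElem_mem hi)]; exact hj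
        have hj2 : j < (((r :: rest)).map (fun row => row.getD i 0)).length := by
          simpa using hj
        have := this j hlen hj2
        simp only [beq_iff_eq] at this
        rw [List.getD_eq_getElem _ _ hi, List.getD_eq_getElem _ _ hj,
            List.getD_eq_getElem _ _ hlen]
        exact this
      · rintro ⟨-, h⟩ k hk hk2
        rw [all_zip_iff]
        intro j hj1 hj2
        simp only [List.getElem_map, List.getElem_range, beq_iff_eq]
        have hjlt : j < (r :: rest).length := by
          rw [← hsq _ (List.getElem_mem hk)]; exact hj1
        have := h k j hk hjlt
        rw [List.getD_eq_getElem _ _ hk, List.getD_eq_getElem _ _ hjlt,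
            List.getD_eq_getElem _ _ hj1] at this
        exact this
  · have hb : (m.any fun fila => fila.length != m.length) = true := by
      rw [List.any_eq_true]
      push Not at hsq
      obtain ⟨f, hf, hne⟩ := hsq
      exact ⟨f, hf, by simpa using hne⟩
    simp only [hb, if_true, Bool.false_eq_true, false_iff]
    intro ⟨h1, _⟩; exact hsq h1

-- ===== VERDICT (by name: the statement is the Claim_ definition above) =====
theorem es_matriz_simetrica_spec : Claim_equal_es_matriz_simetrica := by
  intro m _
  unfold Spec_es_matriz_simetrica
  rw [Bool.eq_iff_iff, esA_iff, esB_iff]
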